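-- pv_equiv track=rewrite | github.com/TeeKay-FourTwentyOne/math | ramsey-book-graphs/second_moment_v2.py | compute_B
-- ===== SOURCE A (Python) =====
-- def compute_B(S_set, p):
--     """Compute B(d) for d=1,...,p-1."""
--     B = [0] * p
--     for a in S_set:
--         for b in S_set:
--             if a != b:
--                 d = (a - b) % p
--                 B[d] += 1
--     return B
-- ===== SOURCE B (Python) =====
-- def compute_B(S_set, p):
--     """Compute B(d) for d=1,...,p-1."""
--     cnt = {}
--     for x in S_set:
--         r = x % p
--         cnt[r] = cnt.get(r, 0) + 1
--     eqcnt = {}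
--     for x in S_set:
--         eqcnt[x] = eqcnt.get(x, 0) + 1
--     B = [0] * p
--     items = list(cnt.items())
--     for r1, k1 in items:
--         for r2, k2 in items:
--             B[(r1 - r2) % p] += k1 * k2
--     for k in eqcnt.values():
--         B[0] -= k * k
--     return B
-- ===== Notes on version B (the rewrite author's own statement) =====
-- stated objective: faster
-- what changed: Instead of scattering over all n^2 element pairs, B builds a counter of residues mod p and a counter of values in one pass each, then convolves the at-most-min(n,p) distinct residue classes pairwise with multiplicities and subtracts the equal-value pair counts from bucket 0.
-- outside the precondition, e.g. on compute_B({1}, -2): A returns [], B raises IndexError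
import Mathlib
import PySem

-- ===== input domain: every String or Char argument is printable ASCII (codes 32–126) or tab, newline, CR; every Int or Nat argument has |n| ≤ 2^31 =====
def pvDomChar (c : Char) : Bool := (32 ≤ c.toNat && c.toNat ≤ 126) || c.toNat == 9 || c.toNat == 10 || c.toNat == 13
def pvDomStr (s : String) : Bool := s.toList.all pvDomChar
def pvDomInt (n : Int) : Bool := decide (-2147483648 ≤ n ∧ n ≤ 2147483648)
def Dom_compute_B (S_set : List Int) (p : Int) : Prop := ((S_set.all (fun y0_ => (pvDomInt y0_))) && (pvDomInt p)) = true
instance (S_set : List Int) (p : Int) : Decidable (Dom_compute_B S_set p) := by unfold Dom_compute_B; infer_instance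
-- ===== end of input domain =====

-- B replaces A's scatter over all n^2 element pairs by counters of residues and values built in one
-- pass, convolving only the distinct residue classes with multiplicities (objective: faster).


-- ===== PORT A =====
def compute_B (S_set : List Int) (p : Int) : List Int :=
  let B := PySem.List.pyRepeat [(0 : Int)] p            -- B = [0] * p
  S_set.foldl (fun B a =>
    S_set.foldl (fun B b =>
      if a ≠ b then
        let d := PySem.Int.mod (a - b) p                -- d = (a - b) % p
        PySem.List.pySetD B d (PySem.List.pyGetD B d 0 + 1)   -- B[d] += 1
      else B) B) B

-- ===== PORT B =====
def compute_B_alt (S_set : List Int) (p : Int) : List Int :=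
  let cnt := S_set.foldl (fun d x =>
      let r := PySem.Int.mod x p
      d.insert r (d.getD r 0 + 1)) (PySem.Dict.empty : PySem.Dict Int Int)
  let eqcnt := S_set.foldl (fun d x =>
      d.insert x (d.getD x 0 + 1)) (PySem.Dict.empty : PySem.Dict Int Int)
  let B := PySem.List.pyRepeat [(0 : Int)] p
  let items := cnt.items
  let B := items.foldl (fun B q1 =>
      items.foldl (fun B q2 =>
        PySem.List.pySetD B (PySem.Int.mod (q1.1 - q2.1) p)
          (PySem.List.pyGetD B (PySem.Int.mod (q1.1 - q2.1) p) 0 + q1.2 * q2.2)) B) B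
  eqcnt.values.foldl (fun B k =>
      PySem.List.pySetD B 0 (PySem.List.pyGetD B 0 0 - k * k)) B

-- ===== PRECONDITION & SPEC =====
-- Pre_ excludes nonempty all-equal lists with p ≤ 0 (A returns [] there only because its loop body
-- never runs; B's counter loop takes x % 0 or indexes B[0] into the empty list and raises) and every
-- input where A itself raises (p ≤ 0 with two distinct elements: IndexError / ZeroDivisionError).
def Pre_compute_B (S_set : List Int) (p : Int) : Prop := 1 ≤ p ∨ S_set = []
instance (S_set : List Int) (p : Int) : Decidable (Pre_compute_B S_set p) := by unfold Pre_compute_B; infer_instance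
def pvWitness_compute_B : List Int × Int := ([0, 1, 5, 1], 3)
def Spec_compute_B (S_set : List Int) (p : Int) (out : List Int) : Prop := out = compute_B_alt S_set p
instance (S_set : List Int) (p : Int) (out : List Int) : Decidable (Spec_compute_B S_set p out) := by unfold Spec_compute_B; infer_instance

-- ===== CLAIM (what is proved, stated in full; the proofs are below) =====
def Claim_equal_compute_B : Prop := ∀ (S_set : List Int) (p : Int), Dom_compute_B S_set p → Pre_compute_B S_set p → Spec_compute_B S_set p (compute_B S_set p)

-- ===== LEMMAS AND PROOFS =====

-- the residue list, the residue convolution and the equal-value correction both sides reduce to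
def pvR (S : List Int) (p : Int) : List Int := S.map (fun x => PySem.Int.mod x p)
def pvConv (S : List Int) (p : Int) (j : Nat) : Int :=
  ((PySem.Set.ofList (pvR S p)).map (fun r1 =>
    ((PySem.Set.ofList (pvR S p)).map (fun r2 =>
      if PySem.Int.mod (r1 - r2) p = (j : Int)
      then ((pvR S p).count r1 : Int) * ((pvR S p).count r2 : Int) else 0)).sum)).sum
def pvEq (S : List Int) : Int :=
  ((PySem.Set.ofList S).map (fun v => (S.count v : Int) * (S.count v : Int))).sum

-- length is preserved by a scatter loop
theorem pv_scatter_length {α : Type} (l : List α) (f w : α → Int) (B : List Int) :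
    (l.foldl (fun B x => PySem.List.pySetD B (f x) (PySem.List.pyGetD B (f x) 0 + w x)) B).length = B.length := by
  induction l generalizing B with
  | nil => rfl
  | cons x t ih => rw [List.foldl_cons, ih, PySem.List.length_pySetD]

-- a scatter loop adds, at index j, the weights of the elements whose bucket is j
theorem pv_scatter_get {α : Type} (l : List α) (f w : α → Int) (B : List Int)
    (hf : ∀ x ∈ l, 0 ≤ f x ∧ f x < B.length) (j : Nat) (hj : j < B.length) :
    PySem.List.pyGetD (l.foldl (fun B x => PySem.List.pySetD B (f x) (PySem.List.pyGetD B (f x) 0 + w x)) B) (j : Int) 0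
      = PySem.List.pyGetD B (j : Int) 0 + (l.map (fun x => if f x = (j : Int) then w x else 0)).sum := by
  induction l generalizing B with
  | nil => simp
  | cons x t ih =>
    obtain ⟨h0, h1⟩ := hf x (by simp)
    have hlen : (PySem.List.pySetD B (f x) (PySem.List.pyGetD B (f x) 0 + w x)).length = B.length :=
      PySem.List.length_pySetD ..
    rw [List.foldl_cons, ih _ (fun y hy => by rw [hlen]; exact hf y (by simp [hy])) (by omega)]
    have hfx : f x = (((f x).toNat : Nat) : Int) := (Int.toNat_of_nonneg h0).symm
    have hget : PySem.List.pyGetD (PySem.List.pySetD B (f x) (PySem.List.pyGetD B (f x) 0 + w x)) (j : Int) 0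
        = PySem.List.pyGetD B (j : Int) 0 + (if f x = (j : Int) then w x else 0) := by
      rw [hfx, PySem.List.pyGetD_pySetD_natCast B ((f x).toNat) j _ 0 (by omega)]
      by_cases h : j = (f x).toNat
      · simp [h]
      · rw [if_neg h, if_neg (by omega), add_zero]
    rw [hget]
    simp only [List.map_cons, List.sum_cons]
    ring

-- nested foldl is foldl over the flatMap
theorem pv_foldl_foldl {α β γ : Type} (l : List α) (g : α → List β) (s : γ → β → γ) (init : γ) :
    l.foldl (fun acc a => (g a).foldl s acc) init = (l.flatMap g).foldl s init := by
  induction l generalizing init with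
  | nil => rfl
  | cons x t ih => simp [List.foldl_append, ih]

-- group a sum over a list by the distinct values of the list
theorem pv_group_sum (l : List Int) (g : Int → Int) :
    (l.map g).sum = ((PySem.Set.ofList l).map (fun v => (l.count v : Int) * g v)).sum := by
  rw [Finset.sum_list_map_count]
  have hnd : (PySem.Set.ofList l).Nodup := PySem.Set.nodup_ofList l
  have hfs : (PySem.Set.ofList l).toFinset = l.toFinset := by
    ext v; simp [List.mem_toFinset, PySem.Set.mem_ofList]
  rw [← List.sum_toFinset _ hnd, hfs]
  apply Finset.sum_congr rfl
  intro m _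
  simp

-- sum of an indicator of equality with a fixed value
theorem pv_sum_ite_eq_count (l : List Int) (a : Int) (c : Int) :
    (l.map (fun b => if b = a then c else 0)).sum = (l.count a : Int) * c := by
  induction l with
  | nil => simp
  | cons x t ih =>
    by_cases h : x = a
    · simp [h, ih]; ring
    · simp [h, ih]

theorem pv_sum_flatMap {α β : Type} (l : List α) (g : α → List β) (h : β → Int) :
    ((l.flatMap g).map h).sum = (l.map (fun a => ((g a).map h).sum)).sum := by
  induction l with
  | nil => rfl
  | cons x t ih => simp [List.flatMap_cons, ih]

theorem pv_sum_filter_map {α : Type} (l : List α) (q : α → Bool) (w : α → Int) :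
    ((l.filter q).map w).sum = (l.map (fun x => if q x then w x else 0)).sum := by
  induction l with
  | nil => rfl
  | cons x t ih => by_cases h : q x <;> simp [h, ih]

theorem pv_sum_map_sub {α : Type} (l : List α) (f g : α → Int) :
    (l.map (fun x => f x - g x)).sum = (l.map f).sum - (l.map g).sum := by
  induction l with
  | nil => rfl
  | cons x t ih => simp [ih]; ring

theorem pv_sum_map_neg {α : Type} (l : List α) (f : α → Int) :
    (l.map (fun x => -(f x))).sum = -((l.map f).sum) := by
  induction l with
  | nil => rfl
  | cons x t ih => simp [ih]; ring

-- cnt loop is the counter of residues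
theorem pv_cnt (S : List Int) (p : Int) :
    S.foldl (fun d x =>
      let r := PySem.Int.mod x p
      d.insert r (d.getD r 0 + 1)) (PySem.Dict.empty : PySem.Dict Int Int)
    = PySem.Dict.counter (pvR S p) := by
  rw [← PySem.Dict.foldl_insert_getD_add_one_eq_counter, pvR, List.foldl_map]

-- main double loop flattened to a single scatter over pairs of counter items
theorem pv_main (items : List (Int × Int)) (p : Int) (B : List Int) :
    items.foldl (fun B q1 =>
      items.foldl (fun B q2 =>
        PySem.List.pySetD B (PySem.Int.mod (q1.1 - q2.1) p)
          (PySem.List.pyGetD B (PySem.Int.mod (q1.1 - q2.1) p) 0 + q1.2 * q2.2)) B) B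
    = (items.flatMap (fun q1 => items.map (fun q2 => (q1, q2)))).foldl
        (fun B q => PySem.List.pySetD B (PySem.Int.mod (q.1.1 - q.2.1) p)
          (PySem.List.pyGetD B (PySem.Int.mod (q.1.1 - q.2.1) p) 0 + q.1.2 * q.2.2)) B := by
  rw [← pv_foldl_foldl]
  apply PySem.List.foldl_congr_mem
  intro B q1 _
  rw [List.foldl_map]

-- A flattened to a single scatter over the filtered pairs
theorem pv_A_flat (S : List Int) (p : Int) :
    compute_B S p
    = (S.flatMap (fun a => (S.filter (fun b => decide (a ≠ b))).map (fun b => (a, b)))).foldl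
        (fun B q => PySem.List.pySetD B (PySem.Int.mod (q.1 - q.2) p)
          (PySem.List.pyGetD B (PySem.Int.mod (q.1 - q.2) p) 0 + 1))
        (PySem.List.pyRepeat [(0 : Int)] p) := by
  rw [compute_B, ← pv_foldl_foldl]
  apply PySem.List.foldl_congr_mem
  intro B a _
  rw [List.foldl_map, ← PySem.List.foldl_ite_eq_foldl_filter (fun b => a ≠ b)]

-- A's entry j is the nested pair count
theorem pv_A_nested (S : List Int) (p : Int) (hp : 1 ≤ p) (j : Nat) (hj : j < p.toNat) :
    PySem.List.pyGetD (compute_B S p) (j : Int) 0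
      = (S.map (fun a => (S.map (fun b =>
          if a ≠ b ∧ PySem.Int.mod (a - b) p = (j : Int) then (1 : Int) else 0)).sum)).sum := by
  have hp' : (0 : Int) < p := by omega
  have hlen : (PySem.List.pyRepeat [(0 : Int)] p).length = p.toNat := by
    rw [PySem.List.pyRepeat_singleton]; simp
  rw [pv_A_flat]
  rw [pv_scatter_get _ (fun q : Int × Int => PySem.Int.mod (q.1 - q.2) p) (fun _ => 1) _
        (by
          intro q _
          show (0:Int) ≤ PySem.Int.mod (q.1 - q.2) p ∧ PySem.Int.mod (q.1 - q.2) p < ((PySem.List.pyRepeat [(0:Int)] p).length : Int)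
          rw [hlen]
          refine ⟨PySem.Int.mod_nonneg _ hp', ?_⟩
          have := PySem.Int.mod_lt (q.1 - q.2) hp'
          omega)
        j (by omega)]
  have h0 : PySem.List.pyGetD (PySem.List.pyRepeat [(0 : Int)] p) (j : Int) 0 = 0 := by
    rw [PySem.List.pyRepeat_singleton]; simp [PySem.List.pyGetD_natCast]
  rw [h0, zero_add, pv_sum_flatMap]
  apply congrArg
  apply List.map_congr_left
  intro a _
  rw [List.map_map, pv_sum_filter_map]
  apply congrArg
  apply List.map_congr_left
  intro b _
  by_cases h1 : a = b <;> by_cases h2 : PySem.Int.mod (a - b) p = (j : Int) <;>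
    simp [h1, h2, Function.comp]

theorem pv_B_char (S : List Int) (p : Int) (hp : 1 ≤ p) (j : Nat) (hj : j < p.toNat) :
    PySem.List.pyGetD (compute_B_alt S p) (j : Int) 0
      = pvConv S p j - (if (j : Int) = 0 then pvEq S else 0) := by
  have hp' : (0 : Int) < p := by omega
  have hlen : (PySem.List.pyRepeat [(0 : Int)] p).length = p.toNat := by
    rw [PySem.List.pyRepeat_singleton]; simp
  have hsub : (fun (B : List Int) (k : Int) => PySem.List.pySetD B 0 (PySem.List.pyGetD B 0 0 - k * k))
      = (fun (B : List Int) (k : Int) => PySem.List.pySetD B ((fun _ : Int => (0 : Int)) k)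
          (PySem.List.pyGetD B ((fun _ : Int => (0 : Int)) k) 0 + (fun k : Int => -(k * k)) k)) := by
    funext B k; rw [sub_eq_add_neg]
  simp only [compute_B_alt]
  rw [pv_cnt, PySem.Dict.foldl_insert_getD_add_one_eq_counter, PySem.Dict.items_counter, pv_main, hsub]
  set I := (PySem.Set.ofList (pvR S p)).map (fun k => (k, ((pvR S p).count k : Int))) with hI
  set LB := I.flatMap (fun q1 => I.map (fun q2 => (q1, q2))) with hLB
  set M := LB.foldl (fun B q => PySem.List.pySetD B (PySem.Int.mod (q.1.1 - q.2.1) p)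
      (PySem.List.pyGetD B (PySem.Int.mod (q.1.1 - q.2.1) p) 0 + q.1.2 * q.2.2))
      (PySem.List.pyRepeat [(0 : Int)] p) with hM
  have hMlen : M.length = p.toNat := by
    rw [hM, pv_scatter_length (f := fun q : (Int × Int) × (Int × Int) => PySem.Int.mod (q.1.1 - q.2.1) p)
        (w := fun q : (Int × Int) × (Int × Int) => q.1.2 * q.2.2), hlen]
  rw [pv_scatter_get _ (fun _ : Int => (0 : Int)) (fun k : Int => -(k * k)) M
        (by intro x _; show (0:Int) ≤ 0 ∧ (0:Int) < (M.length : Int); rw [hMlen]; omega)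
        j (by rw [hMlen]; omega)]
  rw [hM, pv_scatter_get _ (fun q : (Int × Int) × (Int × Int) => PySem.Int.mod (q.1.1 - q.2.1) p)
        (fun q : (Int × Int) × (Int × Int) => q.1.2 * q.2.2) _
        (by
          intro q _
          show (0:Int) ≤ PySem.Int.mod (q.1.1 - q.2.1) p ∧ PySem.Int.mod (q.1.1 - q.2.1) p < ((PySem.List.pyRepeat [(0:Int)] p).length : Int)
          rw [hlen]
          refine ⟨PySem.Int.mod_nonneg _ hp', ?_⟩
          have := PySem.Int.mod_lt (q.1.1 - q.2.1) hp'
          omega)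
        j (by rw [hlen]; omega)]
  have h0 : PySem.List.pyGetD (PySem.List.pyRepeat [(0 : Int)] p) (j : Int) 0 = 0 := by
    rw [PySem.List.pyRepeat_singleton]; simp [PySem.List.pyGetD_natCast]
  rw [h0, zero_add, hLB, pv_sum_flatMap]
  have hconv : ((I.map (fun q1 => ((I.map (fun q2 => (q1, q2))).map
        (fun q : (Int × Int) × (Int × Int) => if PySem.Int.mod (q.1.1 - q.2.1) p = (j : Int) then q.1.2 * q.2.2 else 0)).sum)).sum)
      = pvConv S p j := by
    rw [hI]
    simp only [List.map_map, pvConv, Function.comp_def]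
  rw [hconv]
  have hvals : (PySem.Dict.counter S).values = (PySem.Set.ofList S).map (fun v => (S.count v : Int)) := by
    show (PySem.Dict.counter S).items.map Prod.snd = _
    rw [PySem.Dict.items_counter, List.map_map]
    rfl
  rw [hvals, List.map_map]
  by_cases hj0 : (j : Int) = 0
  · have heq : ((PySem.Set.ofList S).map ((fun k : Int => if (0:Int) = (j:Int) then -(k*k) else 0) ∘ (fun v => (S.count v : Int)))).sum
        = -(pvEq S) := by
      have h1 : ((PySem.Set.ofList S).map ((fun k : Int => if (0:Int) = (j:Int) then -(k*k) else 0) ∘ (fun v => (S.count v : Int)))).sum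
          = ((PySem.Set.ofList S).map (fun v => -((S.count v : Int) * (S.count v : Int)))).sum := by
        apply congrArg
        apply List.map_congr_left
        intro v _
        simp [hj0]
      rw [h1, pv_sum_map_neg]
      rfl
    rw [heq, if_pos hj0]
    ring
  · have heq : ((PySem.Set.ofList S).map ((fun k : Int => if (0:Int) = (j:Int) then -(k*k) else 0) ∘ (fun v => (S.count v : Int)))).sum = 0 := by
      have h1 : ∀ v ∈ PySem.Set.ofList S, ((fun k : Int => if (0:Int) = (j:Int) then -(k*k) else 0) ∘ (fun v => (S.count v : Int))) v = 0 := by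
        intro v _
        simp only [Function.comp_def]
        rw [if_neg (fun h => hj0 h.symm)]
      rw [List.map_congr_left h1]
      simp
    rw [heq, if_neg hj0]
    ring

theorem pv_identity (S : List Int) (p : Int) (hp : 1 ≤ p) (j : Nat) :
    (S.map (fun a => (S.map (fun b =>
        if a ≠ b ∧ PySem.Int.mod (a - b) p = (j : Int) then (1 : Int) else 0)).sum)).sum
      = pvConv S p j - (if (j : Int) = 0 then pvEq S else 0) := by
  have hp' : (0 : Int) < p := by omega
  have hmodm : ∀ a b : Int, PySem.Int.mod (a - b) p
      = PySem.Int.mod (PySem.Int.mod a p - PySem.Int.mod b p) p := by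
    intro a b
    simp only [PySem.Int.mod_eq_emod_of_pos hp']
    exact Int.sub_emod a b p
  have hmod0 : PySem.Int.mod 0 p = 0 := by
    simp [PySem.Int.mod_eq_emod_of_pos hp']
  -- split each inner indicator into the unrestricted one minus the a = b one
  have hsplit : (S.map (fun a => (S.map (fun b =>
      if a ≠ b ∧ PySem.Int.mod (a - b) p = (j : Int) then (1 : Int) else 0)).sum)).sum
      = (S.map (fun a => (S.map (fun b =>
          if PySem.Int.mod (a - b) p = (j : Int) then (1 : Int) else 0)).sum)).sum
        - (S.map (fun a => (S.map (fun b =>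
          if a = b ∧ PySem.Int.mod (a - b) p = (j : Int) then (1 : Int) else 0)).sum)).sum := by
    rw [← pv_sum_map_sub]
    apply congrArg
    apply List.map_congr_left
    intro a _
    rw [← pv_sum_map_sub]
    apply congrArg
    apply List.map_congr_left
    intro b _
    by_cases h1 : a = b <;> by_cases h2 : PySem.Int.mod (a - b) p = (j : Int) <;> simp [h1, h2]
  rw [hsplit]
  -- the a = b part is the equal-value correction
  have hcorr : (S.map (fun a => (S.map (fun b =>
      if a = b ∧ PySem.Int.mod (a - b) p = (j : Int) then (1 : Int) else 0)).sum)).sum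
      = (if (j : Int) = 0 then pvEq S else 0) := by
    have h1 : ∀ a ∈ S, (S.map (fun b =>
        if a = b ∧ PySem.Int.mod (a - b) p = (j : Int) then (1 : Int) else 0)).sum
        = (S.count a : Int) * (if (0 : Int) = (j : Int) then (1 : Int) else 0) := by
      intro a _
      rw [← pv_sum_ite_eq_count S a]
      apply congrArg
      apply List.map_congr_left
      intro b _
      by_cases h : b = a
      · subst h
        simp [sub_self, hmod0]
      · rw [if_neg h, if_neg (by rintro ⟨h', _⟩; exact h h'.symm)]
    rw [List.map_congr_left h1]
    have h2 : (S.map (fun a => (S.count a : Int) * (if (0 : Int) = (j : Int) then (1 : Int) else 0))).sum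
        = (if (0 : Int) = (j : Int) then (1 : Int) else 0) * (S.map (fun a => (S.count a : Int))).sum := by
      rw [← PySem.List.sum_map_const_mul_int]
      apply congrArg
      apply List.map_congr_left
      intro a _
      ring
    rw [h2, pv_group_sum S (fun v => (S.count v : Int))]
    by_cases hj0 : (j : Int) = 0
    · rw [if_pos hj0.symm, if_pos hj0, one_mul]; rfl
    · rw [if_neg (fun h => hj0 h.symm), if_neg hj0, zero_mul]
  rw [hcorr]
  -- the unrestricted part is the residue convolution
  have hmain : (S.map (fun a => (S.map (fun b =>
      if PySem.Int.mod (a - b) p = (j : Int) then (1 : Int) else 0)).sum)).sum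
      = pvConv S p j := by
    -- inner sums grouped by residue
    have hinner : ∀ a ∈ S, (S.map (fun b =>
        if PySem.Int.mod (a - b) p = (j : Int) then (1 : Int) else 0)).sum
        = ((PySem.Set.ofList (pvR S p)).map (fun r2 =>
            ((pvR S p).count r2 : Int) *
              (if PySem.Int.mod (PySem.Int.mod a p - r2) p = (j : Int) then (1 : Int) else 0))).sum := by
      intro a _
      have e1 : (S.map (fun b => if PySem.Int.mod (a - b) p = (j : Int) then (1 : Int) else 0)).sum
          = ((pvR S p).map (fun r2 => if PySem.Int.mod (PySem.Int.mod a p - r2) p = (j : Int) then (1 : Int) else 0)).sum := by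
        rw [pvR, List.map_map]
        apply congrArg
        apply List.map_congr_left
        intro b _
        simp only [Function.comp_def]
        rw [hmodm a b]
      rw [e1, pv_group_sum]
    rw [List.map_congr_left hinner]
    -- outer sum grouped by residue
    have e2 : (S.map (fun a => ((PySem.Set.ofList (pvR S p)).map (fun r2 =>
        ((pvR S p).count r2 : Int) *
          (if PySem.Int.mod (PySem.Int.mod a p - r2) p = (j : Int) then (1 : Int) else 0))).sum)).sum
        = ((pvR S p).map (fun r1 => ((PySem.Set.ofList (pvR S p)).map (fun r2 =>
            ((pvR S p).count r2 : Int) *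
              (if PySem.Int.mod (r1 - r2) p = (j : Int) then (1 : Int) else 0))).sum)).sum := by
      rw [pvR, List.map_map]
      rfl
    rw [e2, pv_group_sum (pvR S p)]
    rw [pvConv]
    apply congrArg
    apply List.map_congr_left
    intro r1 _
    rw [← PySem.List.sum_map_const_mul_int]
    apply congrArg
    apply List.map_congr_left
    intro r2 _
    by_cases h : PySem.Int.mod (r1 - r2) p = (j : Int) <;> simp [h]
  rw [hmain]

theorem pv_len_A (S : List Int) (p : Int) : (compute_B S p).length = p.toNat := by
  rw [pv_A_flat]
  rw [pv_scatter_length (f := fun q : Int × Int => PySem.Int.mod (q.1 - q.2) p) (w := fun _ => 1)]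
  rw [PySem.List.pyRepeat_singleton]; simp

theorem pv_len_B (S : List Int) (p : Int) : (compute_B_alt S p).length = p.toNat := by
  have hsub : (fun (B : List Int) (k : Int) => PySem.List.pySetD B 0 (PySem.List.pyGetD B 0 0 - k * k))
      = (fun (B : List Int) (k : Int) => PySem.List.pySetD B ((fun _ : Int => (0 : Int)) k)
          (PySem.List.pyGetD B ((fun _ : Int => (0 : Int)) k) 0 + (fun k : Int => -(k * k)) k)) := by
    funext B k; rw [sub_eq_add_neg]
  simp only [compute_B_alt]
  rw [pv_cnt, PySem.Dict.foldl_insert_getD_add_one_eq_counter, PySem.Dict.items_counter, pv_main, hsub]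
  rw [pv_scatter_length (f := fun _ : Int => (0 : Int)) (w := fun k : Int => -(k * k))]
  rw [pv_scatter_length (f := fun q : (Int × Int) × (Int × Int) => PySem.Int.mod (q.1.1 - q.2.1) p)
      (w := fun q : (Int × Int) × (Int × Int) => q.1.2 * q.2.2)]
  rw [PySem.List.pyRepeat_singleton]; simp

theorem compute_B_spec : Claim_equal_compute_B := by
  intro S p _ hpre
  unfold Spec_compute_B
  rcases hpre with hp | rfl
  · apply List.ext_getElem (by rw [pv_len_A, pv_len_B])
    intro j h1 h2
    have hj : j < p.toNat := by rw [pv_len_A] at h1; exact h1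
    have hA := pv_A_nested S p hp j hj
    have hB := pv_B_char S p hp j hj
    have hI := pv_identity S p hp j
    have : PySem.List.pyGetD (compute_B S p) (j : Int) 0
        = PySem.List.pyGetD (compute_B_alt S p) (j : Int) 0 := by rw [hA, hB, hI]
    simpa [PySem.List.pyGetD_natCast, List.getD_eq_getElem?_getD, List.getElem?_eq_getElem, h1, h2] using this
  · rfl

-- ===== VERDICT (by name: the statement is the Claim_ definition above) =====
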